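-- pv_equiv track=rewrite | github.com/shainer/matasano | set2/cut_paste.py | StartPositionEqualBytes
-- ===== SOURCE A (Python) =====
-- def StartPositionEqualBytes(s1, s2):
-- 	assert len(s1) == len(s2)
-- 	start_pos = -1
-- 	size = 0
-- 	found_equal_byte = False
--
-- 	for i in range(0, len(s1)):
-- 		if s1[i] == s2[i]:
-- 			if not found_equal_byte:
-- 				start_pos = i
-- 				found_equal_byte = True
-- 			size += 1
--
-- 		if found_equal_byte and s1[i] != s2[i]:
-- 			break
--
-- 	return (start_pos, size)
-- ===== SOURCE B (Python) =====
-- def StartPositionEqualBytes(s1, s2):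
--     assert len(s1) == len(s2)
--     start = next((i for i, (a, b) in enumerate(zip(s1, s2)) if a == b), -1)
--     if start == -1:
--         return (-1, 0)
--     end = start
--     while end < len(s1) and s1[end] == s2[end]:
--         end += 1
--     return (start, end - start)
-- ===== Notes on version B (the rewrite author's own statement) =====
-- stated objective: simpler
-- what changed: Replaces A's flag-and-break state machine with a two-phase decomposition: find the first equal-aligned index, then count the run length from there; no found/start/size flags.
import Mathlib
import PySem

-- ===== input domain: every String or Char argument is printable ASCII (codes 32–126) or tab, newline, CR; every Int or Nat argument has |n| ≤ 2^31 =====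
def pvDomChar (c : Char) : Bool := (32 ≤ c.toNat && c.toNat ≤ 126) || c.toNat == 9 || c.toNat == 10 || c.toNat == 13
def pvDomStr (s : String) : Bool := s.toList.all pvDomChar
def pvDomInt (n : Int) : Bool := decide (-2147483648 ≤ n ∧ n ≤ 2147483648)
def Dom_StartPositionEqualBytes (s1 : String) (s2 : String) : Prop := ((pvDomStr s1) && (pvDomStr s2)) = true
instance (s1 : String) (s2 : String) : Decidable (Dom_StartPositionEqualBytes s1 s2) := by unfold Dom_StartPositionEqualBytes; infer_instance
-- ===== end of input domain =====

-- B replaces A's flag-and-break single pass by a two-phase decomposition (find first equal index, then count the run); objective: simpler.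

-- ===== PORT A =====
-- A's for-loop over i with state (start_pos, size, found_equal_byte) and break; the
-- loop reads the aligned pairs s1[i],s2[i], which (lengths equal, per the assert/Pre_) is the zip.
-- Branches in A's order: on s1[i]==s2[i] update start/found/size and continue (the break test
-- 'found and s1[i]!=s2[i]' is false); otherwise the state is unchanged and we break iff found.
def pvLoopA : List (Char × Char) → Nat → Int → Int → Bool → Int × Int
  | [], _, start, size, _ => (start, size)
  | (a, b) :: rest, i, start, size, found =>
    if a == b then
      if !found then pvLoopA rest (i + 1) (i : Int) (size + 1) true
      else pvLoopA rest (i + 1) start (size + 1) found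
    else if found then (start, size)   -- the break
    else pvLoopA rest (i + 1) start size found

def StartPositionEqualBytes (s1 : String) (s2 : String) : Int × Int :=
  pvLoopA (s1.toList.zip s2.toList) 0 (-1) 0 false

-- ===== PORT B =====
-- next((i for i, (a, b) in enumerate(zip(s1, s2)) if a == b), -1)
def pvFindEq : List (Char × Char) → Nat → Option Nat
  | [], _ => none
  | (a, b) :: rest, i => if a == b then some i else pvFindEq rest (i + 1)

-- while end < len(s1) and s1[end] == s2[end]: end += 1   (walking the aligned pairs from `end`)
def pvWhileB : List (Char × Char) → Nat → Nat
  | [], e => e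
  | (a, b) :: rest, e => if a == b then pvWhileB rest (e + 1) else e

def StartPositionEqualBytes_alt (s1 : String) (s2 : String) : Int × Int :=
  let ps := s1.toList.zip s2.toList
  match pvFindEq ps 0 with
  | none => (-1, 0)
  | some start => ((start : Int), (pvWhileB (ps.drop start) start : Int) - (start : Int))

-- ===== PRECONDITION & SPEC =====
-- Pre_ excludes exactly the inputs where A's assert raises AssertionError: unequal lengths.
def Pre_StartPositionEqualBytes (s1 : String) (s2 : String) : Prop :=
  s1.toList.length = s2.toList.length
instance (s1 : String) (s2 : String) : Decidable (Pre_StartPositionEqualBytes s1 s2) := by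
  unfold Pre_StartPositionEqualBytes; infer_instance

def pvWitness_StartPositionEqualBytes : String × String := ("axb", "ayb")

def Spec_StartPositionEqualBytes (s1 : String) (s2 : String) (out : Int × Int) : Prop := out = StartPositionEqualBytes_alt s1 s2
instance (s1 : String) (s2 : String) (out : Int × Int) : Decidable (Spec_StartPositionEqualBytes s1 s2 out) := by unfold Spec_StartPositionEqualBytes; infer_instance

-- ===== CLAIM (what is proved, stated in full; the proofs are below) =====
def Claim_equal_StartPositionEqualBytes : Prop := ∀ (s1 : String) (s2 : String), Dom_StartPositionEqualBytes s1 s2 → Pre_StartPositionEqualBytes s1 s2 → Spec_StartPositionEqualBytes s1 s2 (StartPositionEqualBytes s1 s2)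

-- ===== LEMMAS AND PROOFS =====

theorem pvFindEq_ge : ∀ (ps : List (Char × Char)) (i j : Nat), pvFindEq ps i = some j → i ≤ j := by
  intro ps
  induction ps with
  | nil => intro i j h; simp [pvFindEq] at h
  | cons p rest ih =>
    intro i j h
    obtain ⟨a, b⟩ := p
    simp only [pvFindEq] at h
    split at h
    · injection h with h; omega
    · have := ih (i + 1) j h; omega

-- with found = true, A's loop adds the length of the leading equal run to size
theorem pvLoopA_found : ∀ (ps : List (Char × Char)) (i : Nat) (s z : Int),
    pvLoopA ps i s z true = (s, z + ((pvWhileB ps i : Int) - (i : Int))) := by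
  intro ps
  induction ps with
  | nil => intro i s z; simp [pvLoopA, pvWhileB]
  | cons p rest ih =>
    intro i s z
    obtain ⟨a, b⟩ := p
    by_cases h : a == b
    · simp only [pvLoopA, pvWhileB, h, if_pos, Bool.not_true, Bool.false_eq_true, if_false, ih]
      refine Prod.ext rfl ?_
      push_cast; ring
    · simp [pvLoopA, pvWhileB, h]

theorem pvLoopA_main : ∀ (ps : List (Char × Char)) (i : Nat),
    pvLoopA ps i (-1) 0 false =
      (match pvFindEq ps i with
       | none => ((-1 : Int), (0 : Int))
       | some j => ((j : Int), (pvWhileB (ps.drop (j - i)) j : Int) - (j : Int))) := by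
  intro ps
  induction ps with
  | nil => intro i; simp [pvLoopA, pvFindEq]
  | cons p rest ih =>
    intro i
    obtain ⟨a, b⟩ := p
    by_cases h : a == b
    · -- start found at i: found becomes true, size 1, continue with the found-state loop
      simp only [pvLoopA, pvFindEq, h, if_pos, Bool.not_false, pvLoopA_found,
        Nat.sub_self, List.drop_zero, pvWhileB]
      refine Prod.ext rfl ?_
      push_cast; ring
    · -- unequal, not yet found: state unchanged, no break
      simp only [pvLoopA, pvFindEq, h, Bool.false_eq_true, if_false]
      rw [ih (i + 1)]
      cases hf : pvFindEq rest (i + 1) with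
      | none => simp
      | some j =>
        have hji : i + 1 ≤ j := pvFindEq_ge rest (i + 1) j hf
        have hd : (((a, b) :: rest).drop (j - i)) = rest.drop (j - (i + 1)) := by
          have : j - i = (j - (i + 1)) + 1 := by omega
          rw [this]; simp
        simp only [hd]

-- ===== VERDICT (by name: the statement is the Claim_ definition above) =====
theorem StartPositionEqualBytes_spec : Claim_equal_StartPositionEqualBytes := by
  intro s1 s2 _ _
  unfold Spec_StartPositionEqualBytes StartPositionEqualBytes StartPositionEqualBytes_alt
  rw [pvLoopA_main]
  simp only [Nat.sub_zero]
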